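-- pv_equiv track=rewrite | github.com/samlama/SMS_SPAM_DETECTION | TCS/SOLORIDER/pickUpService/traverse_cities.py | james_journey
-- ===== SOURCE A (Python) =====
-- from collections import defaultdict
--
-- def traverse_cities(city_graph, current_city, visited):
--     visited[current_city] = True
--     route_map = [current_city]
--
--     for neighbor, goods, tax in city_graph[current_city]:
--         if not visited[neighbor]:
--             route, total_tax = traverse_cities(city_graph, neighbor, visited)
--             route_map.extend(route)
--             route_map.append(current_city)
--             total_tax += tax * goods
--             return route_map, total_tax
--     return route_map, 0
--
-- def james_journey(N, city_info):
--     city_graph = defaultdict(list)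
--
--     for _ in range(N-1):
--         city1, city2, goods, tax = city_info[_]
--         city_graph[city1].append((city2, goods, tax))
--         city_graph[city2].append((city1, goods, tax))
--
--     visited = {city: False for city in city_graph}
--     route_map, total_tax = traverse_cities(city_graph, list(city_graph.keys())[0], visited)
--     return '-'.join(route_map[::-1]), total_tax
-- ===== SOURCE B (Python) =====
-- def james_journey(N, city_info):
--     # Two-phase iterative rewrite: walk the path collecting cities and the
--     # per-edge tax*goods products, then join the palindrome and sum at the end.
--     graph = {}
--     for c1, c2, goods, tax in city_info[:N - 1]:
--         graph.setdefault(c1, []).append((c2, goods, tax))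
--         graph.setdefault(c2, []).append((c1, goods, tax))
--     start = next(iter(graph))
--     seen = {start}
--     path = [start]
--     products = []
--     cur = start
--     while True:
--         options = [(nb, g, t) for nb, g, t in graph[cur] if nb not in seen]
--         if not options:
--             break
--         nb, g, t = options[0]
--         seen.add(nb)
--         path.append(nb)
--         products.append(t * g)
--         cur = nb
--     return '-'.join(path + path[:-1][::-1]), sum(products)
-- ===== Notes on version B (the rewrite author's own statement) =====
-- stated objective: alternative
-- what changed: Replaces the recursive helper that builds the palindromic route and adds taxes while unwinding by a two-phase iterative walk: filter-and-step collects the path and the per-edge tax*goods products, then the palindrome is joined and the products summed at the end.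
-- outside the precondition, e.g. on james_journey(1, []): A raises IndexError, B raises StopIteration; on james_journey(3, [('a', 'b', 1, 1)]): A raises IndexError, B returns ('a-b-a', 1)
import Mathlib
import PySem

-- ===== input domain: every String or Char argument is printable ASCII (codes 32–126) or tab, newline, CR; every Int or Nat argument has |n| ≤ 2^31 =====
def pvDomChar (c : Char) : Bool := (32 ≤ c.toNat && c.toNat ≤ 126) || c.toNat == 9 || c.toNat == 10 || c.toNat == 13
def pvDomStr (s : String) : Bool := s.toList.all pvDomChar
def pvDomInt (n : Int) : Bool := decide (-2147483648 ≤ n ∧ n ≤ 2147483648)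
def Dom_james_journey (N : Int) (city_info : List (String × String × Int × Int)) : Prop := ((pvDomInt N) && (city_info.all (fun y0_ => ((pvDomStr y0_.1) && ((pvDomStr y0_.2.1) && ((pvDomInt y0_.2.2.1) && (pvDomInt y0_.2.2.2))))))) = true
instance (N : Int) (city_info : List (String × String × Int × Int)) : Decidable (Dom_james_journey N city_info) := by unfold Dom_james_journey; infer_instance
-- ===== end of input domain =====

-- B replaces A's palindromic recursion by a two-phase iterative walk (path + edge products, summed at the end); same return value, A mutates no argument.

-- ===== PORT A =====
-- city_graph[c1].append(e) on a defaultdict(list): lookup-or-[] then append.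
def pvAddEdgeA (g : PySem.Dict String (List (String × Int × Int)))
    (e : String × String × Int × Int) : PySem.Dict String (List (String × Int × Int)) :=
  let g1 := g.insert e.1 (g.getD e.1 [] ++ [(e.2.1, e.2.2.1, e.2.2.2)])
  g1.insert e.2.1 (g1.getD e.2.1 [] ++ [(e.1, e.2.2.1, e.2.2.2)])

-- traverse_cities; the for-loop with early return is find? of the first unvisited
-- neighbor.  fuel = number of cities: each recursive call marks one more city
-- visited, so the Python recursion depth never exceeds it and fuel never runs out.
def pvTravA (g : PySem.Dict String (List (String × Int × Int))) :
    Nat → String → PySem.Dict String Bool → List String × Int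
  | 0, cur, _ => ([cur], 0)
  | fuel+1, cur, vis =>
    let vis' := vis.insert cur true
    match (g.getD cur []).find? (fun e => !(vis'.getD e.1 false)) with
    | some (nb, goods, tax) =>
      let r := pvTravA g fuel nb vis'
      ([cur] ++ r.1 ++ [cur], r.2 + tax * goods)
    | none => ([cur], 0)

def james_journey (N : Int) (city_info : List (String × String × Int × Int)) : String × Int :=
  let og := (PySem.List.pyRange 0 (N-1) 1).foldl
      (fun og i => og.bind fun g => (PySem.List.pyGet? city_info i).map (fun e => pvAddEdgeA g e))
      (some PySem.Dict.empty)
  match og with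
  | none => ("", 0)  -- IndexError: city_info[_] out of range; excluded by Pre_
  | some g =>
    let visited := g.keys.foldl (fun d c => d.insert c false) PySem.Dict.empty
    match PySem.List.pyGet? g.keys 0 with
    | none => ("", 0)  -- IndexError: list(city_graph.keys())[0] on the empty graph; excluded by Pre_
    | some start =>
      let r := pvTravA g g.keys.length start visited
      -- route_map[::-1] is List.reverse (PySem.List.slice?_none_none_neg_one)
      (PySem.Str.join "-" r.1.reverse, r.2)

-- ===== PORT B =====
-- the while/break walk of Source B: filter the adjacency list by 'not in seen',
-- stop on empty, else take options[0]; one step per fuel unit, fuel = number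
-- of cities (the walk visits each city at most once, so fuel never runs out).
-- State: current city, seen-set, the path so far and the tax*goods products so far.
def pvWalkB (g : PySem.Dict String (List (String × Int × Int))) :
    Nat → String → PySem.Set String → List String → List Int → List String × List Int
  | 0, _, _, path, prods => (path, prods)
  | fuel+1, cur, seen, path, prods =>
    match (g.getD cur []).filter (fun e => !(seen.contains e.1)) with
    | [] => (path, prods)
    | (nb, goods, tax) :: _ =>
      pvWalkB g fuel nb (seen.add nb) (path ++ [nb]) (prods ++ [tax * goods])

def james_journey_alt (N : Int) (city_info : List (String × String × Int × Int)) : String × Int :=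
  -- graph.setdefault(c, []).append(e) is exactly Dict.modify c [] (· ++ [e])
  let g := (PySem.List.slice city_info none (some (N-1))).foldl
      (fun g e => (g.modify e.1 [] (· ++ [(e.2.1, e.2.2.1, e.2.2.2)])).modify e.2.1 []
                    (· ++ [(e.1, e.2.2.1, e.2.2.2)]))
      PySem.Dict.empty
  match g.keys with
  | [] => ("", 0)  -- next(iter(graph)) raises StopIteration on the empty graph; excluded by Pre_
  | start :: _ =>
    let r := pvWalkB g g.keys.length start (PySem.Set.ofList [start]) [start] []
    -- path[:-1] is dropLast (slice_to_neg_one), [::-1] is reverse (slice?_none_none_neg_one)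
    (PySem.Str.join "-" (r.1 ++ r.1.dropLast.reverse), r.2.sum)

-- ===== PRECONDITION & SPEC =====
-- Pre_ is exactly where A returns: N ≥ 2 and at least N-1 edges (otherwise IndexError).
def Pre_james_journey (N : Int) (city_info : List (String × String × Int × Int)) : Prop :=
  2 ≤ N ∧ N - 1 ≤ (city_info.length : Int)
instance (N : Int) (city_info : List (String × String × Int × Int)) : Decidable (Pre_james_journey N city_info) := by unfold Pre_james_journey; infer_instance

def pvWitness_james_journey : Int × (List (String × String × Int × Int)) := (2, [("a", "b", 1, 1)])

def Spec_james_journey (N : Int) (city_info : List (String × String × Int × Int)) (out : String × Int) : Prop := out = james_journey_alt N city_info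
instance (N : Int) (city_info : List (String × String × Int × Int)) (out : String × Int) : Decidable (Spec_james_journey N city_info out) := by unfold Spec_james_journey; infer_instance

-- ===== CLAIM (what is proved, stated in full; the proofs are below) =====
def Claim_equal_james_journey : Prop := ∀ (N : Int) (city_info : List (String × String × Int × Int)), Dom_james_journey N city_info → Pre_james_journey N city_info → Spec_james_journey N city_info (james_journey N city_info)

-- ===== LEMMAS AND PROOFS =====

-- B's inline setdefault/append step computes the same dict as A's helper
-- (Dict.modify unfolds to insert∘getD)
lemma pvAddEdge_eq :
    (fun (g : PySem.Dict String (List (String × Int × Int))) (e : String × String × Int × Int) =>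
      (g.modify e.1 [] (· ++ [(e.2.1, e.2.2.1, e.2.2.2)])).modify e.2.1 []
        (· ++ [(e.1, e.2.2.1, e.2.2.2)])) = pvAddEdgeA := rfl

-- first match of a scan = head of the filtered list
lemma pvFindFilter {α : Type} (p : α → Bool) (l : List α) :
    l.find? p = (l.filter p).head? := List.head?_filter.symm

-- A's Option-threaded indexed build loop equals B's slice-based build
lemma pvBuild_eq (city_info : List (String × String × Int × Int)) :
    ∀ (n : Nat) (g0 : PySem.Dict String (List (String × Int × Int))), n ≤ city_info.length →
    (PySem.List.pyRange 0 (n : Int) 1).foldl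
      (fun og i => og.bind fun g => (PySem.List.pyGet? city_info i).map (fun e => pvAddEdgeA g e))
      (some g0)
    = some ((city_info.take n).foldl pvAddEdgeA g0) := by
  intro n
  induction n with
  | zero =>
    intro g0 _
    rw [show ((0:Nat):Int) = 0 by norm_num, PySem.List.pyRange_one_eq_nil (le_refl 0)]
    simp
  | succ m ih =>
    intro g0 h
    have hm : m < city_info.length := by omega
    rw [show ((m+1:Nat):Int) = (m:Int) + 1 by push_cast; ring,
        PySem.List.pyRange_one_succ_right (by omega), List.foldl_append, ih g0 (by omega)]
    simp only [List.foldl_cons, List.foldl_nil, Option.bind_some]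
    rw [PySem.List.pyGet?_natCast, List.getElem?_eq_getElem hm, List.take_add_one,
        List.getElem?_eq_getElem hm, List.foldl_append]
    rfl

-- every value of the all-False visited dict is False
lemma pvVisFalse (ks : List String) :
    ∀ (d : PySem.Dict String Bool), (∀ x, d.getD x false = false) →
    ∀ x, (ks.foldl (fun d c => d.insert c false) d).getD x false = false := by
  induction ks with
  | nil => intro d hd x; exact hd x
  | cons k ks ih =>
    intro d hd x
    refine ih _ (fun y => ?_) x
    by_cases hy : y = k
    · subst hy; exact PySem.Dict.getD_insert_self d y false false
    · rw [PySem.Dict.getD_insert_of_ne d false false hy]; exact hd y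

lemma pvEmptyGetD (x : String) :
    (PySem.Dict.empty : PySem.Dict String Bool).getD x false = false := rfl

-- pvWalkB accumulates: peel off the path/products accumulators
lemma pvWalk_acc (g : PySem.Dict String (List (String × Int × Int))) :
    ∀ (fuel : Nat) (cur : String) (vis : PySem.Set String) (path : List String) (prods : List Int),
    pvWalkB g fuel cur vis path prods
    = (path ++ (pvWalkB g fuel cur vis [] []).1, prods ++ (pvWalkB g fuel cur vis [] []).2) := by
  intro fuel
  induction fuel with
  | zero => intro cur vis path prods; simp [pvWalkB]
  | succ f ih =>
    intro cur vis path prods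
    cases hf : (g.getD cur []).filter (fun e => !(vis.contains e.1)) with
    | nil => simp only [pvWalkB, hf]; simp
    | cons e rest =>
      obtain ⟨nb, goods, tax⟩ := e
      simp only [pvWalkB, hf]
      rw [ih nb (vis.add nb) (path ++ [nb]) (prods ++ [tax * goods]),
          ih nb (vis.add nb) ([] ++ [nb]) ([] ++ [tax * goods])]
      simp [List.append_assoc]

-- the palindrome q ++ reverse (dropLast q) is its own reverse
lemma pvPalRev (q : List String) :
    (q ++ q.dropLast.reverse).reverse = q ++ q.dropLast.reverse := by
  induction q using List.reverseRecOn with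
  | nil => simp
  | append_singleton i l _ => simp

-- main lockstep lemma: A's recursion = palindrome of B's walk, tax = sum of products
lemma pvMain (g : PySem.Dict String (List (String × Int × Int))) :
    ∀ (fuel : Nat) (cur : String) (visD : PySem.Dict String Bool) (visS : PySem.Set String),
    (∀ x, (visD.insert cur true).getD x false = visS.contains x) →
    pvTravA g fuel cur visD
    = ((cur :: (pvWalkB g fuel cur visS [] []).1)
        ++ (cur :: (pvWalkB g fuel cur visS [] []).1).dropLast.reverse,
       (pvWalkB g fuel cur visS [] []).2.sum) := by
  intro fuel
  induction fuel with
  | zero => intro cur visD visS _; simp [pvTravA, pvWalkB]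
  | succ f ih =>
    intro cur visD visS H
    have hp : (fun e : String × Int × Int => !((visD.insert cur true).getD e.1 false))
            = (fun e : String × Int × Int => !(visS.contains e.1)) := by
      funext e; rw [H e.1]
    simp only [pvTravA, pvWalkB, hp, pvFindFilter]
    cases hf : (g.getD cur []).filter (fun e => !(visS.contains e.1)) with
    | nil => simp
    | cons e rest =>
      obtain ⟨nb, goods, tax⟩ := e
      simp only [List.head?_cons]
      have H' : ∀ x, ((visD.insert cur true).insert nb true).getD x false
                    = (visS.add nb).contains x := by
        intro x
        by_cases hx : x = nb
        · subst hx
          rw [PySem.Dict.getD_insert_self]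
          have hm : x ∈ visS.add x := (PySem.Set.mem_add visS x x).mpr (Or.inr rfl)
          simp [PySem.Set.contains, List.contains_eq_mem, hm]
        · rw [PySem.Dict.getD_insert_of_ne _ _ _ hx, H x]
          simp [PySem.Set.contains, List.contains_eq_mem, PySem.Set.mem_add, hx]
      rw [ih nb (visD.insert cur true) (visS.add nb) H']
      rw [pvWalk_acc g f nb (visS.add nb) ([] ++ [nb]) ([] ++ [tax * goods])]
      simp only [List.nil_append, List.cons_append, Prod.mk.injEq]
      constructor
      · rw [List.dropLast_cons₂]
        simp [List.append_assoc]
      · simp [List.sum_cons]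
        ring

lemma pvInsertKeysNe {ν : Type} (d : PySem.Dict String ν) (k : String) (v : ν) :
    (d.insert k v).keys ≠ [] := by
  intro h
  have h1 : (d.insert k v).get? k = some v := PySem.Dict.get?_insert_self d k v
  have h2 : (d.insert k v).get? k = none :=
    (PySem.Dict.get?_eq_none_iff_not_mem_keys _ k).mpr (by simp [h])
  rw [h1] at h2
  cases h2

lemma pvFoldKeysNe (l : List (String × String × Int × Int)) :
    ∀ (g0 : PySem.Dict String (List (String × Int × Int))), l ≠ [] →
    ((l.foldl pvAddEdgeA g0).keys) ≠ [] := by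
  induction l using List.reverseRecOn with
  | nil => intro g0 h; exact absurd rfl h
  | append_singleton i e _ =>
    intro g0 _
    rw [List.foldl_append]
    exact pvInsertKeysNe _ _ _

theorem james_journey_spec : Claim_equal_james_journey := by
  intro N ci _ hpre
  obtain ⟨h2, hlen⟩ := hpre
  unfold Spec_james_journey
  have hn : (0:Int) ≤ N - 1 := by omega
  have hlen' : (N-1).toNat ≤ ci.length := by omega
  have hpr : N - 1 = (((N-1).toNat : Nat) : Int) := by omega
  have hsl : PySem.List.slice ci none (some (N-1)) = ci.take (N-1).toNat :=
    PySem.List.slice_to ci hn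
  simp only [james_journey, james_journey_alt, hsl, pvAddEdge_eq]
  rw [show PySem.List.pyRange 0 (N-1) 1 = PySem.List.pyRange 0 (((N-1).toNat : Nat) : Int) 1 by rw [← hpr]]
  rw [pvBuild_eq ci (N-1).toNat PySem.Dict.empty hlen']
  have htk : ci.take (N-1).toNat ≠ [] := by
    simp only [ne_eq, List.take_eq_nil_iff]
    push Not
    refine ⟨by omega, fun hciNil => ?_⟩
    rw [hciNil] at hlen
    simp at hlen
    omega
  have hkne := pvFoldKeysNe (ci.take (N-1).toNat) PySem.Dict.empty htk
  obtain ⟨start, rest, hk⟩ : ∃ s r,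
      ((ci.take (N-1).toNat).foldl pvAddEdgeA PySem.Dict.empty).keys = s :: r := by
    cases he : ((ci.take (N-1).toNat).foldl pvAddEdgeA PySem.Dict.empty).keys with
    | nil => exact absurd he hkne
    | cons s r => exact ⟨s, r, rfl⟩
  have h0 : PySem.List.pyGet? (start :: rest) (0:Int) = some start := by
    simp
  simp only [hk, h0]
  have hof : PySem.Set.ofList [start] = [start] := by
    simp [PySem.Set.ofList, PySem.Set.add, PySem.Set.contains, PySem.Set.empty]
  have H0 : ∀ x,
      (((start :: rest).foldl (fun d c => d.insert c false) PySem.Dict.empty).insert start true).getD x false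
      = (PySem.Set.ofList [start]).contains x := by
    intro x
    rw [hof]
    by_cases hx : x = start
    · subst hx
      rw [PySem.Dict.getD_insert_self]
      simp [PySem.Set.contains, List.contains_eq_mem]
    · rw [PySem.Dict.getD_insert_of_ne _ _ _ hx,
         pvVisFalse (start :: rest) PySem.Dict.empty (fun y => pvEmptyGetD y) x]
      simp [PySem.Set.contains, List.contains_eq_mem, hx]
  rw [pvMain _ (start :: rest).length start _ _ H0]
  rw [pvWalk_acc _ (start :: rest).length start (PySem.Set.ofList [start]) [start] []]
  simp only [List.singleton_append, List.nil_append, Prod.mk.injEq]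
  constructor
  · rw [pvPalRev]
  · trivial
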